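-- pv_equiv track=rewrite | github.com/kimzeze/Programmers-python | 프로그래머스/0/181926. 수 조작하기 1/수 조작하기 1.py | solution
-- ===== SOURCE A (Python) =====
-- def solution(n, control):
--     for target in control:
--         if target == 'w':
--             n += 1
--         elif target == 's':
--             n -= 1
--         elif target == 'd':
--             n += 10
--         elif target == 'a':
--             n -= 10
--
--     return n
-- ===== SOURCE B (Python) =====
-- def solution(n, control):
--     return (n + control.count('w') - control.count('s')
--               + 10 * control.count('d') - 10 * control.count('a'))
-- ===== Notes on version B (the rewrite author's own statement) =====
-- stated objective: idiomatic
-- what changed: Replaces the accumulating per-character Python loop with a closed-form combination of four independent str.count scans.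
import Mathlib
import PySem

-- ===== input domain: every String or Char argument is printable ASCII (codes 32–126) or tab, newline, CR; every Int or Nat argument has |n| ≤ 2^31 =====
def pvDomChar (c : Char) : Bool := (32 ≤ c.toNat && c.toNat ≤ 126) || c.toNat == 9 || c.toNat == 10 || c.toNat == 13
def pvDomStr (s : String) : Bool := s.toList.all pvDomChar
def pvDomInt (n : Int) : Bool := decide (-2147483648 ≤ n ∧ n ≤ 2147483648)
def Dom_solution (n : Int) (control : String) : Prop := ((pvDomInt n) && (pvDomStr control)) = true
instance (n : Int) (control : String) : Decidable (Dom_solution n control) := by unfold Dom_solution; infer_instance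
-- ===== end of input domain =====

-- B replaces A's single accumulating loop by a closed-form combination of four
-- independent character-count scans (idiomatic; same return value on all inputs).

-- ===== PORT A =====
-- literal port of A: one pass over the string, accumulating n
def solution (n : Int) (control : String) : Int :=
  control.toList.foldl
    (fun n target =>
      if target == 'w' then n + 1
      else if target == 's' then n - 1
      else if target == 'd' then n + 10
      else if target == 'a' then n - 10
      else n) n

-- ===== PORT B =====
-- literal port of Source B: n + count('w') - count('s') + 10*count('d') - 10*count('a').
-- Python's str.count with a single-character argument counts occurrences of that
-- character, which is exactly List.count on the code points (exact on all inputs).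
def solution_alt (n : Int) (control : String) : Int :=
  n + (control.toList.count 'w' : Int) - (control.toList.count 's' : Int)
    + 10 * (control.toList.count 'd' : Int) - 10 * (control.toList.count 'a' : Int)

-- ===== PRECONDITION & SPEC =====
def Spec_solution (n : Int) (control : String) (out : Int) : Prop := out = solution_alt n control
instance (n : Int) (control : String) (out : Int) : Decidable (Spec_solution n control out) := by unfold Spec_solution; infer_instance

-- ===== CLAIM (what is proved, stated in full; the proofs are below) =====
def Claim_equal_solution : Prop := ∀ (n : Int) (control : String), Dom_solution n control → Spec_solution n control (solution n control)

-- ===== LEMMAS AND PROOFS =====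

-- A's loop computes the closed form, by induction on the character list
theorem solution_foldl_closed (l : List Char) (n : Int) :
    l.foldl
      (fun n target =>
        if target == 'w' then n + 1
        else if target == 's' then n - 1
        else if target == 'd' then n + 10
        else if target == 'a' then n - 10
        else n) n
    = n + (l.count 'w' : Int) - (l.count 's' : Int)
        + 10 * (l.count 'd' : Int) - 10 * (l.count 'a' : Int) := by
  induction l generalizing n with
  | nil => simp
  | cons c t ih =>
    simp only [List.foldl_cons, ih, List.count_cons]
    by_cases hw : c = 'w' <;> by_cases hs : c = 's' <;> by_cases hd : c = 'd' <;>
      by_cases ha : c = 'a' <;> simp_all <;> ring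

-- ===== VERDICT (by name: the statement is the Claim_ definition above) =====
theorem solution_spec : Claim_equal_solution := by
  intro n control _
  unfold Spec_solution solution solution_alt
  rw [solution_foldl_closed]
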